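-- pv_equiv track=rewrite | github.com/tsuru7/algorithm-study | typical90/27/A.py | solve
-- ===== SOURCE A (Python) =====
-- def solve(n,sList):
--     member = set()
--     ans=[]
--     for i in range(n):
--         si = sList[i]
--         if si in member:
--             continue
--         member.add(si)
--         ans.append(i+1)
--     return ans
-- ===== SOURCE B (Python) =====
-- def solve(n, sList):
--     # Back-to-front: walk the indices in reverse, overwriting, so each name
--     # ends up mapped to its smallest index; then sort the kept positions.
--     first = {}
--     for i in reversed(range(n)):
--         first[sList[i]] = i
--     return sorted(v + 1 for v in first.values())
-- ===== Notes on version B (the rewrite author's own statement) =====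
-- stated objective: alternative
-- what changed: Instead of a forward scan that maintains a 'seen' set and appends indices in order, B walks the indices back-to-front overwriting a dict entry per name (so each name keeps its smallest index) and then sorts the collected positions.
import Mathlib
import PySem

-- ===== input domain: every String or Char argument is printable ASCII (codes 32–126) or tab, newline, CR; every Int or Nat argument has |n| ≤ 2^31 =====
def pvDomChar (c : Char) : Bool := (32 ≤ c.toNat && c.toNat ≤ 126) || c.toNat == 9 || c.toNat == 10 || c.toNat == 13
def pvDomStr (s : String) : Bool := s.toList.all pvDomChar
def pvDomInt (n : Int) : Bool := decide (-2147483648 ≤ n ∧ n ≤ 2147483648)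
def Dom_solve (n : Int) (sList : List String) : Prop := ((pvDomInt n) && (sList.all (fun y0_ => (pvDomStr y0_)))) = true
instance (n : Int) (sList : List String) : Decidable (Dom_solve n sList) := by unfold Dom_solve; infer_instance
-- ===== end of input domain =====

-- B replaces A's forward scan with a maintained 'seen' set by a back-to-front pass that
-- overwrites a dict entry per name (keeping the smallest index) followed by a sort;
-- objective: alternative (not faster). Equal on Pre_ (n ≤ len; beyond it A raises IndexError).

-- ===== PORT A =====
-- loop 'for i in range(n)' over the range list, state (member, ans); pyGet? none = IndexError (excluded by Pre_)
def solveGo (sList : List String) : List Int → PySem.Set String → List Int → List Int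
  | [], _, ans => ans
  | i :: rest, member, ans =>
    match PySem.List.pyGet? sList i with
    | none => ans
    | some si =>
      if PySem.Set.contains member si then solveGo sList rest member ans
      else solveGo sList rest (PySem.Set.add member si) (ans ++ [i + 1])

def solve (n : Int) (sList : List String) : List Int :=
  solveGo sList (PySem.List.pyRange 0 n 1) PySem.Set.empty []

-- ===== PORT B =====
-- 'for i in reversed(range(n)): first[sList[i]] = i', then 'sorted(v + 1 for v in first.values())'
def solve_alt (n : Int) (sList : List String) : List Int :=
  let first := (PySem.List.pyRange 0 n 1).reverse.foldl
    (fun d i =>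
      match PySem.List.pyGet? sList i with
      | some s => PySem.Dict.insert d s i
      | none => d)
    PySem.Dict.empty
  PySem.List.sorted ((PySem.Dict.values first).map (fun v => v + 1)) (fun x => x)

-- ===== PRECONDITION & SPEC =====
-- Pre_: n ≤ len(sList) — beyond that, both A and B raise IndexError on sList[i]
def Pre_solve (n : Int) (sList : List String) : Prop := n ≤ (sList.length : Int)
instance (n : Int) (sList : List String) : Decidable (Pre_solve n sList) := by unfold Pre_solve; infer_instance
def pvWitness_solve : Int × List String := (3, ["a", "b", "a"])
def Spec_solve (n : Int) (sList : List String) (out : List Int) : Prop := out = solve_alt n sList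
instance (n : Int) (sList : List String) (out : List Int) : Decidable (Spec_solve n sList out) := by unfold Spec_solve; infer_instance

-- ===== CLAIM (what is proved, stated in full; the proofs are below) =====
def Claim_equal_solve : Prop := ∀ (n : Int) (sList : List String), Dom_solve n sList → Pre_solve n sList → Spec_solve n sList (solve n sList)

-- ===== LEMMAS AND PROOFS =====

-- the test 'first occurrence of sList[i] is i itself', used to characterise A's output
def keepIdx (sList : List String) (i : Int) : Option Int :=
  match PySem.List.pyGet? sList i with
  | none => none
  | some si =>
    match PySem.List.index? sList si with
    | some k => if (k : Int) = i then some (i + 1) else none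
    | none => none

-- first occurrence of sList[j] is before j  ↔  sList[j] is in the first j elements
lemma mem_take_iff_index_lt (sList : List String) (j : Nat) (hj : j < sList.length) :
    sList[j] ∈ sList.take j ↔ ∃ k : Nat, PySem.List.index? sList sList[j] = some k ∧ k < j := by
  have hmem : sList[j] ∈ sList := List.getElem_mem hj
  have hsome : ∃ k, PySem.List.index? sList sList[j] = some k := by
    have := (PySem.List.index?_isSome_iff (xs := sList) (v := sList[j])).mpr hmem
    exact Option.isSome_iff_exists.mp this
  obtain ⟨k, hk⟩ := hsome
  obtain ⟨hklt, hkeq, hmin⟩ := PySem.List.getElem_of_index?_eq_some hk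
  constructor
  · intro hmemtake
    refine ⟨k, hk, ?_⟩
    obtain ⟨m, hm, hmeq⟩ := List.getElem_of_mem hmemtake
    have hmm : m < min j sList.length := by rw [← List.length_take]; exact hm
    have hmlen : m < sList.length := by omega
    have hmj : m < j := by omega
    have hval : sList[m] = sList[j] := by
      rw [← hmeq]; exact (List.getElem_take).symm
    by_contra hnk
    have hmk : m < k := by omega
    exact hmin m hmk hval
  · rintro ⟨k', hk', hklt'⟩
    have : k' = k := by rw [hk] at hk'; exact (Option.some.injEq _ _).mp hk' |>.symm
    subst this
    have : sList[k']'(by omega) ∈ sList.take j := by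
      rw [List.mem_take_iff_getElem]
      exact ⟨k', by simp; omega, by simp⟩
    rwa [hkeq] at this

-- Set.ofList of a take-prefix extended by one element
lemma ofList_take_succ (sList : List String) (j : Nat) (hj : j < sList.length) :
    PySem.Set.ofList (sList.take (j + 1))
      = PySem.Set.add (PySem.Set.ofList (sList.take j)) sList[j] := by
  have h : sList.take (j + 1) = sList.take j ++ [sList[j]] := List.take_succ_eq_append_getElem hj
  rw [h, PySem.Set.ofList_eq_foldl, List.foldl_append]
  simp [PySem.Set.ofList_eq_foldl]

-- membership in the prefix set
lemma contains_ofList_take (sList : List String) (j : Nat) (s : String) :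
    PySem.Set.contains (PySem.Set.ofList (sList.take j)) s = true ↔ s ∈ sList.take j := by
  constructor
  · intro h
    have : s ∈ PySem.Set.ofList (sList.take j) := by
      simpa [PySem.Set.contains] using h
    exact (PySem.Set.mem_ofList _ _).mp this
  · intro h
    have : s ∈ PySem.Set.ofList (sList.take j) := (PySem.Set.mem_ofList _ _).mpr h
    simpa [PySem.Set.contains] using this

-- A's loop from position j appends exactly the kept indices of range(j, N)
lemma go_eq_filterMap (sList : List String) (N : Nat) (hN : N ≤ sList.length) :
    ∀ (m j : Nat), j + m = N → ∀ (ans : List Int),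
      solveGo sList (PySem.List.pyRange (j : Int) (N : Int) 1)
        (PySem.Set.ofList (sList.take j)) ans
      = ans ++ (PySem.List.pyRange (j : Int) (N : Int) 1).filterMap (keepIdx sList) := by
  intro m
  induction m with
  | zero =>
    intro j hj ans
    have : (N : Int) ≤ (j : Int) := by omega
    rw [PySem.List.pyRange_one_eq_nil this]
    simp [solveGo]
  | succ m ih =>
    intro j hj ans
    have hjN : (j : Int) < (N : Int) := by exact_mod_cast (by omega : j < N)
    have hjlen : j < sList.length := by omega
    rw [PySem.List.pyRange_one_cons hjN]
    have hget : PySem.List.pyGet? sList (j : Int) = some sList[j] := by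
      simp [PySem.List.pyGet?_natCast, List.getElem?_eq_getElem hjlen]
    have hstep : ((j : Int) + 1) = ((j + 1 : Nat) : Int) := by push_cast; ring
    by_cases hmem : sList[j] ∈ sList.take j
    · -- already seen: A skips, the test fails
      have hc : PySem.Set.contains (PySem.Set.ofList (sList.take j)) sList[j] = true :=
        (contains_ofList_take sList j _).mpr hmem
      obtain ⟨k, hk, hklt⟩ := (mem_take_iff_index_lt sList j hjlen).mp hmem
      have hkeep : keepIdx sList (j : Int) = none := by
        simp only [keepIdx, hget, hk]
        have : ¬ ((k : Int) = (j : Int)) := by exact_mod_cast (by omega : ¬ k = j)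
        simp [this]
      simp only [solveGo, hget, hc, if_true, List.filterMap_cons, hkeep]
      have hset : PySem.Set.ofList (sList.take j) = PySem.Set.ofList (sList.take (j + 1)) := by
        rw [ofList_take_succ sList j hjlen]
        simp [PySem.Set.add, hmem]
      rw [hset, hstep]
      exact ih (j + 1) (by omega) ans
    · -- new element: A records it, the test succeeds
      have hc : PySem.Set.contains (PySem.Set.ofList (sList.take j)) sList[j] = false := by
        by_contra h
        exact hmem ((contains_ofList_take sList j _).mp (by simpa using h))
      have hkeep : keepIdx sList (j : Int) = some ((j : Int) + 1) := by
        have hmemL : sList[j] ∈ sList := List.getElem_mem hjlen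
        have hsome : ∃ k, PySem.List.index? sList sList[j] = some k :=
          Option.isSome_iff_exists.mp
            ((PySem.List.index?_isSome_iff (xs := sList) (v := sList[j])).mpr hmemL)
        obtain ⟨k, hk⟩ := hsome
        have hkj : k = j := by
          obtain ⟨hklt, hkeq, hmin⟩ := PySem.List.getElem_of_index?_eq_some hk
          by_contra hne
          rcases Nat.lt_or_ge k j with hlt | hge
          · exact hmem ((mem_take_iff_index_lt sList j hjlen).mpr ⟨k, hk, hlt⟩)
          · have : j < k := by omega
            exact hmin j this rfl
        subst hkj
        simp only [keepIdx, hget, hk]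
        simp
      simp only [solveGo, hget, hc, if_false, Bool.false_eq_true,
        List.filterMap_cons, hkeep]
      have hset : PySem.Set.add (PySem.Set.ofList (sList.take j)) sList[j]
          = PySem.Set.ofList (sList.take (j + 1)) := (ofList_take_succ sList j hjlen).symm
      rw [hset, hstep, ih (j + 1) (by omega) (ans ++ [((j + 1 : Nat) : Int)])]
      simp

-- index? is stable under appending on the right
lemma index?_append_right (xs ys : List String) (s : String) (k : Nat)
    (h : PySem.List.index? xs s = some k) :
    PySem.List.index? (xs ++ ys) s = some k := by
  obtain ⟨pre, suf, hx, hl, hnm⟩ := (PySem.List.index?_eq_some_iff xs s k).mp h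
  exact (PySem.List.index?_eq_some_iff _ s k).mpr ⟨pre, suf ++ ys, by simp [hx], hl, hnm⟩

-- first occurrence at the freshly appended element
lemma index?_append_new (xs ys : List String) (s : String) (h : s ∉ xs) :
    PySem.List.index? (xs ++ s :: ys) s = some xs.length :=
  (PySem.List.index?_eq_some_iff _ s xs.length).mpr ⟨xs, ys, rfl, rfl, h⟩

-- index? in a prefix agrees with index? in the whole list for k < N
lemma index?_take_iff (l : List String) (s : String) (N k : Nat) (hk : k < N) :
    PySem.List.index? l s = some k ↔ PySem.List.index? (l.take N) s = some k := by
  constructor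
  · intro h
    obtain ⟨pre, suf, hx, hl, hnm⟩ := (PySem.List.index?_eq_some_iff l s k).mp h
    refine (PySem.List.index?_eq_some_iff _ s k).mpr ⟨pre, suf.take (N - k - 1), ?_, hl, hnm⟩
    subst hx
    rw [List.take_append]
    have hpre : pre.take N = pre := List.take_of_length_le (by omega)
    have : N - pre.length = (N - k - 1) + 1 := by omega
    rw [hpre, this]
    rfl
  · intro h
    obtain ⟨pre, suf, hx, hl, hnm⟩ := (PySem.List.index?_eq_some_iff _ s k).mp h
    refine (PySem.List.index?_eq_some_iff l s k).mpr ⟨pre, suf ++ l.drop N, ?_, hl, hnm⟩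
    conv_lhs => rw [← List.take_append_drop N l]
    rw [hx]
    simp

-- the reverse-insert loop, after congr-rewriting, looked up at s: last write wins = first occurrence
lemma get?_revFold (sList : List String) (s : String) :
    ∀ (j : Nat), j ≤ sList.length → ∀ (d : PySem.Dict String Int),
      ((List.range j).reverse.foldl
          (fun d k => d.insert (sList.getD k "") ((k : Nat) : Int)) d).get? s
        = match PySem.List.index? (sList.take j) s with
          | some k => some ((k : Nat) : Int)
          | none => d.get? s := by
  intro j
  induction j with
  | zero => intro _ d; simp [PySem.List.index?]
  | succ j ih =>
    intro hj d
    have hjlen : j < sList.length := by omega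
    rw [List.range_succ, List.reverse_append]
    simp only [List.reverse_singleton, List.singleton_append, List.foldl_cons]
    have hgd : sList.getD j "" = sList[j] := by
      simp [List.getD_eq_getElem?_getD, List.getElem?_eq_getElem hjlen]
    rw [hgd, ih (by omega)]
    have htk : sList.take (j + 1) = sList.take j ++ [sList[j]] :=
      List.take_succ_eq_append_getElem hjlen
    by_cases hmem : s ∈ sList.take j
    · obtain ⟨k, hk⟩ := Option.isSome_iff_exists.mp
        ((PySem.List.index?_isSome_iff (sList.take j) s).mpr hmem)
      have hk' : PySem.List.index? (sList.take (j + 1)) s = some k := by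
        rw [htk]; exact index?_append_right _ _ _ _ hk
      rw [hk, hk']
    · have hnone : PySem.List.index? (sList.take j) s = none := by
        rw [← Option.not_isSome_iff_eq_none]
        intro h
        exact hmem ((PySem.List.index?_isSome_iff _ _).mp h)
      rw [hnone, PySem.Dict.get?_insert]
      by_cases hs : s = sList[j]
      · have : PySem.List.index? (sList.take (j + 1)) s = some j := by
          rw [htk, hs]
          have := index?_append_new (sList.take j) [] sList[j] (by rwa [hs] at hmem)
          simpa [List.length_take, Nat.min_eq_left (by omega : j ≤ sList.length)] using this
        rw [this]
        simp [hs]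
      · have : PySem.List.index? (sList.take (j + 1)) s = none := by
          rw [← Option.not_isSome_iff_eq_none]
          intro h
          have := (PySem.List.index?_isSome_iff _ _).mp h
          rw [htk] at this
          rcases List.mem_append.mp this with h1 | h2
          · exact hmem h1
          · exact hs (List.mem_singleton.mp h2)
        rw [this]
        simp [hs]

-- the kept value, when kept, is i + 1
lemma keep_val (sList : List String) (i x : Int) (h : keepIdx sList i = some x) : x = i + 1 := by
  unfold keepIdx at h
  cases hg : PySem.List.pyGet? sList i with
  | none => simp [hg] at h
  | some si =>
    simp only [hg] at h
    cases hidx : PySem.List.index? sList si with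
    | none => simp only [hidx] at h; simp at h
    | some k =>
      simp only [hidx] at h
      split_ifs at h
      exact (Option.some.injEq _ _).mp h |>.symm

-- A's kept indices are strictly increasing
lemma pairwise_AL (sList : List String) (N : Nat) :
    ((PySem.List.pyRange 0 (N : Int) 1).filterMap (keepIdx sList)).Pairwise (fun a b => a < b) := by
  rw [PySem.List.pyRange_zero_natCast]
  refine List.pairwise_filterMap.mpr ?_
  refine List.pairwise_map.mpr ?_
  refine List.Pairwise.imp ?_ List.pairwise_lt_range
  intro a b hab x hx y hy
  rw [keep_val _ _ _ hx, keep_val _ _ _ hy]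
  have : (a : Int) < (b : Int) := by exact_mod_cast hab
  omega

-- the getD projection over range is the prefix
lemma map_range_getD (sList : List String) (N : Nat) (hN : N ≤ sList.length) :
    (List.range N).map (fun k => sList.getD k "") = sList.take N := by
  apply List.ext_getElem
  · simp [List.length_take]; omega
  · intro i h1 h2
    have hiN : i < N := by simpa using h1
    have hil : i < sList.length := by omega
    simp [List.getD_eq_getElem?_getD, List.getElem?_eq_getElem hil, List.getElem_take]

-- A's kept-index list is a permutation of B's dict-values list (before sorting)
lemma perm_AL_X (sList : List String) (N : Nat) (hN : N ≤ sList.length)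
    (first : PySem.Dict String Int)
    (hget : ∀ s, first.get? s
      = match PySem.List.index? (sList.take N) s with
        | some k => some ((k : Nat) : Int)
        | none => none) :
    ((PySem.List.pyRange 0 (N : Int) 1).filterMap (keepIdx sList)).Perm
      ((PySem.Set.ofList (sList.take N).reverse).map (fun s => first.getD s 0 + 1)) := by
  have hgetD : ∀ (s : String) (k : Nat),
      PySem.List.index? (sList.take N) s = some k → first.getD s 0 = (k : Int) := by
    intro s k hk
    rw [PySem.Dict.getD_eq_get?_getD, hget s, hk]
    rfl
  -- Nodup of A's list
  have hndA : ((PySem.List.pyRange 0 (N : Int) 1).filterMap (keepIdx sList)).Nodup :=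
    (pairwise_AL sList N).imp (fun h => ne_of_lt h)
  -- Nodup of B's list
  have hndB : ((PySem.Set.ofList (sList.take N).reverse).map
      (fun s => first.getD s 0 + 1)).Nodup := by
    refine List.Nodup.map_on ?_ (PySem.Set.nodup_ofList _)
    intro s hs t ht hst
    have hsP : s ∈ sList.take N := by
      have := (PySem.Set.mem_ofList _ _).mp hs; simpa using this
    have htP : t ∈ sList.take N := by
      have := (PySem.Set.mem_ofList _ _).mp ht; simpa using this
    obtain ⟨ks, hks⟩ := Option.isSome_iff_exists.mp
      ((PySem.List.index?_isSome_iff (sList.take N) s).mpr hsP)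
    obtain ⟨kt, hkt⟩ := Option.isSome_iff_exists.mp
      ((PySem.List.index?_isSome_iff (sList.take N) t).mpr htP)
    rw [hgetD s ks hks, hgetD t kt hkt] at hst
    have hkk : ks = kt := by omega
    subst hkk
    obtain ⟨h1, h2, _⟩ := PySem.List.getElem_of_index?_eq_some hks
    obtain ⟨h3, h4, _⟩ := PySem.List.getElem_of_index?_eq_some hkt
    rw [← h2, ← h4]
  refine (List.perm_ext_iff_of_nodup hndA hndB).mpr ?_
  intro a
  constructor
  · intro ha
    obtain ⟨i, hi, hkeep⟩ := List.mem_filterMap.mp ha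
    obtain ⟨hi0, hiN⟩ := PySem.List.mem_pyRange_one.mp hi
    set m := i.toNat with hm
    have him : i = (m : Int) := by omega
    have hmN : m < N := by omega
    have hml : m < sList.length := by omega
    rw [him] at hkeep
    unfold keepIdx at hkeep
    simp only [PySem.List.pyGet?_natCast, List.getElem?_eq_getElem hml] at hkeep
    cases hidx : PySem.List.index? sList sList[m] with
    | none => simp only [hidx] at hkeep; simp at hkeep
    | some k =>
      simp only [hidx] at hkeep
      by_cases hki : (k : Int) = (m : Int)
      case neg => rw [if_neg hki] at hkeep; simp at hkeep
      rw [if_pos hki] at hkeep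
      have hkm : k = m := by exact_mod_cast hki
      subst hkm
      have ha' : a = (m : Int) + 1 := ((Option.some.injEq _ _).mp hkeep).symm
      have htake : PySem.List.index? (sList.take N) sList[m] = some m :=
        (index?_take_iff sList sList[m] N m hmN).mp hidx
      refine List.mem_map.mpr ⟨sList[m], ?_, ?_⟩
      · refine (PySem.Set.mem_ofList _ _).mpr ?_
        rw [List.mem_reverse]
        exact (List.mem_take_iff_getElem).mpr ⟨m, by simp; omega, by simp⟩
      · rw [hgetD _ m htake, ha']
  · intro ha
    obtain ⟨s, hs, hval⟩ := List.mem_map.mp ha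
    have hsP : s ∈ sList.take N := by
      have := (PySem.Set.mem_ofList _ _).mp hs; simpa using this
    obtain ⟨k, hk⟩ := Option.isSome_iff_exists.mp
      ((PySem.List.index?_isSome_iff (sList.take N) s).mpr hsP)
    obtain ⟨hkl, hkeq, _⟩ := PySem.List.getElem_of_index?_eq_some hk
    have hkN : k < N := by
      simp [List.length_take] at hkl
      omega
    have hkslen : k < sList.length := by
      simp [List.length_take] at hkl
      omega
    have hfull : PySem.List.index? sList s = some k :=
      (index?_take_iff sList s N k hkN).mpr hk
    have hsk : sList[k] = s := by
      rw [← hkeq]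
      exact (List.getElem_take).symm
    refine List.mem_filterMap.mpr ⟨(k : Int), ?_, ?_⟩
    · exact PySem.List.mem_pyRange_one.mpr ⟨by omega, by exact_mod_cast hkN⟩
    · unfold keepIdx
      simp only [PySem.List.pyGet?_natCast, List.getElem?_eq_getElem hkslen, hsk, hfull]
      rw [← hval, hgetD s k hk]
      simp

-- ===== VERDICT (by name: the statement is the Claim_ definition above) =====
theorem solve_spec : Claim_equal_solve := by
  intro n sList _ hpre
  unfold Pre_solve at hpre
  unfold Spec_solve
  by_cases hn : n ≤ 0
  · rw [solve, solve_alt, PySem.List.pyRange_one_eq_nil hn]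
    rfl
  · 
    set N := n.toNat with hNdef
    have hNn : n = (N : Int) := by omega
    have hNlen : N ≤ sList.length := by omega
    -- A's output = the kept indices of range(N)
    have hA : solve n sList = (PySem.List.pyRange 0 (N : Int) 1).filterMap (keepIdx sList) := by
      have := go_eq_filterMap sList N hNlen N 0 (by omega) []
      rw [solve, hNn]
      simpa [PySem.Set.empty] using this
    -- B's fold, rewritten to the insert-form over (range N).reverse
    have hfold : (PySem.List.pyRange 0 n 1).reverse.foldl
        (fun d i =>
          match PySem.List.pyGet? sList i with
          | some s => PySem.Dict.insert d s i
          | none => d)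
        PySem.Dict.empty
        = (List.range N).reverse.foldl
            (fun d k => d.insert (sList.getD k "") ((k : Nat) : Int)) PySem.Dict.empty := by
      rw [hNn, PySem.List.pyRange_zero_natCast, ← List.map_reverse, List.foldl_map]
      refine PySem.List.foldl_congr_mem _ _ _ _ ?_
      intro acc k hkmem
      have hkN : k < N := by
        rw [List.mem_reverse] at hkmem
        exact List.mem_range.mp hkmem
      have hkl : k < sList.length := by omega
      rw [PySem.List.pyGet?_natCast, List.getElem?_eq_getElem hkl]
      have : sList.getD k "" = sList[k] := by
        simp [List.getD_eq_getElem?_getD, List.getElem?_eq_getElem hkl]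
      rw [this]
    set firstD := (List.range N).reverse.foldl
        (fun d k => d.insert (sList.getD k "") ((k : Nat) : Int)) PySem.Dict.empty with hfirstD
    -- lookups in the dict = first-occurrence indices in the prefix
    have hget : ∀ s, firstD.get? s
        = match PySem.List.index? (sList.take N) s with
          | some k => some ((k : Nat) : Int)
          | none => none := by
      intro s
      rw [hfirstD, get?_revFold sList s N hNlen PySem.Dict.empty]
      cases PySem.List.index? (sList.take N) s with
      | none => simp [PySem.Dict.get?_empty]
      | some k => rfl
    -- keys of the dict = distinct names, back to front
    have hkeys : firstD.keys = PySem.Set.ofList (sList.take N).reverse := by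
      rw [hfirstD, PySem.Dict.keys_foldl_insert_key _ (fun k => sList.getD k "")
        (fun _ k => ((k : Nat) : Int)) PySem.Dict.empty]
      rw [PySem.Dict.keys_empty, List.map_reverse, map_range_getD sList N hNlen]
      simp [PySem.Set.update, PySem.Set.ofList_eq_foldl]
    have hnd : firstD.keys.Nodup := by
      rw [hkeys]; exact PySem.Set.nodup_ofList _
    have hvals : firstD.values.map (fun v => v + 1)
        = (PySem.Set.ofList (sList.take N).reverse).map (fun s => firstD.getD s 0 + 1) := by
      rw [PySem.Dict.values_eq_map_keys firstD hnd 0, hkeys, List.map_map]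
      rfl
    rw [hA, solve_alt]
    simp only [hfold, hvals]
    exact (PySem.List.sorted_eq_of_perm_of_pairwise_lt _ _ _
      (perm_AL_X sList N hNlen firstD hget) (pairwise_AL sList N)).symm
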